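-- pv_equiv track=rewrite | github.com/wangyendt/LeetCode | Contests/week 260/2019. The Score of Students Solving Math Expression/The Score of Students Solving Math Expression.py | scoreOfStudents
-- ===== SOURCE A (Python) =====
-- from typing import List
--
-- import functools
--
-- def scoreOfStudents(s: str, answers: List[int]) -> int:
--     op = ""
--     stack = []
--     for ch in s:
--         if ch in "+*":
--             op = ch
--         else:
--             x = int(ch)
--             if op == "*":
--                 stack[-1] *= x
--             else:
--                 stack.append(x)
--     target = sum(stack)
--
--     @functools.lru_cache(None)
--     def fn(lo, hi):
--         """Return possible answers of s[lo:hi]."""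
--         if lo + 1 == hi: return {int(s[lo])}
--         ans = set()
--         for mid in range(lo + 1, hi, 2):
--             for x in fn(lo, mid):
--                 for y in fn(mid + 1, hi):
--                     if s[mid] == "+" and x + y <= 1000:
--                         ans.add(x + y)
--                     elif s[mid] == "*" and x * y <= 1000:
--                         ans.add(x * y)
--         return ans
--
--     cand = fn(0, len(s))
--     ans = 0
--     for x in answers:
--         if x == target:
--             ans += 5
--         elif x in cand:
--             ans += 2
--     return ans
-- ===== SOURCE B (Python) =====
-- def scoreOfStudents(s, answers):
--     # target: standard precedence evaluation (kept as in the original)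
--     op = ""
--     stack = []
--     for ch in s:
--         if ch in "+*":
--             op = ch
--         else:
--             x = int(ch)
--             if op == "*":
--                 stack[-1] *= x
--             else:
--                 stack.append(x)
--     target = sum(stack)
--
--     # candidate set: explicit bottom-up interval DP.  dp[lo][hi] holds the possible values of
--     # s[lo:hi]; operands can only start at even offsets, so only those intervals are filled.
--     n = len(s)
--     dp = [[set() for _ in range(n + 1)] for _ in range(n + 1)]
--     for lo in range(0, n, 2):
--         dp[lo][lo + 1] = {int(s[lo])}
--     for length in range(2, n + 1):
--         for lo in range(0, n - length + 1, 2):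
--             hi = lo + length
--             cur = set()
--             for mid in range(lo + 1, hi, 2):
--                 for x in dp[lo][mid]:
--                     for y in dp[mid + 1][hi]:
--                         if s[mid] == "+" and x + y <= 1000:
--                             cur.add(x + y)
--                         elif s[mid] == "*" and x * y <= 1000:
--                             cur.add(x * y)
--             dp[lo][hi] = cur
--     cand = dp[0][n]
--     return sum(5 if x == target else (2 if x in cand else 0) for x in answers)
-- ===== Notes on version B (the rewrite author's own statement) =====
-- stated objective: alternative
-- what changed: The memoised top-down recursion fn(lo,hi) over string intervals is replaced by an explicit bottom-up interval DP table filled in increasing interval length over the even (operand-start) offsets; the precedence-based target computation is kept, and the scoring loop becomes a sum comprehension.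
import Mathlib
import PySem

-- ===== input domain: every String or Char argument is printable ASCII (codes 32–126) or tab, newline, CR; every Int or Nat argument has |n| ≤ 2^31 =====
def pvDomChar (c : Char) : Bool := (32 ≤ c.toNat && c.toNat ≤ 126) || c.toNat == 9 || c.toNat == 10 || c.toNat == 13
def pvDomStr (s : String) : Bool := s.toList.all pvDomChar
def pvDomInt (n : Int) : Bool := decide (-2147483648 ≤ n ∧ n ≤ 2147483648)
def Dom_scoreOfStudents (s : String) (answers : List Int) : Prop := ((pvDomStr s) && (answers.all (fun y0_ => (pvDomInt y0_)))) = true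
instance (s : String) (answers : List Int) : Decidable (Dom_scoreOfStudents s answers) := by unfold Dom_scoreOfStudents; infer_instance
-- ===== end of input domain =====

-- B replaces A's memoised top-down recursion fn(lo, hi) by an explicit bottom-up interval DP
-- table filled in increasing interval length (objective: alternative decomposition; same cost).

-- ===== PORT A =====
-- int(ch) for a single character; the .getD 0 only totalises where Python raises (outside Pre_)
def pvChDigit (c : Char) : Int := (PySem.Int.ofChars? [c]).getD 0

-- the precedence (op/stack) loop computing `target`; this code is verbatim identical in A and
-- in B, so both ports share this helper.  op is modelled as List Char ([] = "", [c] = ch).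
def pvTargetStep (st : List Char × List Int) (c : Char) : List Char × List Int :=
  if c = '+' ∨ c = '*' then ([c], st.2)
  else
    let x := pvChDigit c
    if st.1 = ['*'] then (st.1, st.2.dropLast ++ [st.2.getLastD 0 * x])  -- stack[-1] *= x
    else (st.1, st.2 ++ [x])

def pvTarget (cs : List Char) : Int := ((cs.foldl pvTargetStep ([], [])).2).sum

-- fn(lo, hi) of A, with a fuel argument that only makes the recursion structural
-- (fuel = cs.length at the top call is enough for every reachable interval)
def pvFnA (cs : List Char) : Nat → Int → Int → PySem.Set Int
  | 0, _, _ => PySem.Set.empty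
  | fuel+1, lo, hi =>
    if lo + 1 = hi then PySem.Set.add PySem.Set.empty (pvChDigit (PySem.List.pyGetD cs lo ' '))
    else
      (PySem.List.pyRange (lo+1) hi 2).foldl (fun ans mid =>
        (pvFnA cs fuel lo mid).foldl (fun ans x =>
          (pvFnA cs fuel (mid+1) hi).foldl (fun ans y =>
            if PySem.List.pyGetD cs mid ' ' = '+' ∧ x + y ≤ 1000 then PySem.Set.add ans (x+y)
            else if PySem.List.pyGetD cs mid ' ' = '*' ∧ x*y ≤ 1000 then PySem.Set.add ans (x*y)
            else ans) ans) ans) PySem.Set.empty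

def scoreOfStudents (s : String) (answers : List Int) : Int :=
  let cs := s.toList
  let target := pvTarget cs
  let cand := pvFnA cs cs.length 0 (cs.length : Int)
  answers.foldl (fun acc x =>
    if x = target then acc + 5
    else if PySem.Set.contains cand x then acc + 2 else acc) 0

-- ===== PORT B =====
-- B's dp is a 2D list; dp[lo][hi] lookups and dp[lo][hi] = v updates are ported with
-- PySem.List.pyGetD / pySetD (B only ever indexes in range).
def pvGet2 (dp : List (List (PySem.Set Int))) (lo hi : Int) : PySem.Set Int :=
  PySem.List.pyGetD (PySem.List.pyGetD dp lo []) hi PySem.Set.empty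

def pvSet2 (dp : List (List (PySem.Set Int))) (lo hi : Int) (v : PySem.Set Int) : List (List (PySem.Set Int)) :=
  PySem.List.pySetD dp lo (PySem.List.pySetD (PySem.List.pyGetD dp lo []) hi v)

-- the `cur` accumulation for interval [lo, hi) in B
def pvCur (cs : List Char) (dp : List (List (PySem.Set Int))) (lo hi : Int) : PySem.Set Int :=
  (PySem.List.pyRange (lo+1) hi 2).foldl (fun cur mid =>
    (pvGet2 dp lo mid).foldl (fun cur x =>
      (pvGet2 dp (mid+1) hi).foldl (fun cur y =>
        if PySem.List.pyGetD cs mid ' ' = '+' ∧ x + y ≤ 1000 then PySem.Set.add cur (x+y)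
        else if PySem.List.pyGetD cs mid ' ' = '*' ∧ x*y ≤ 1000 then PySem.Set.add cur (x*y)
        else cur) cur) cur) PySem.Set.empty

def scoreOfStudents_alt (s : String) (answers : List Int) : Int :=
  let cs := s.toList
  let target := pvTarget cs
  let n : Int := cs.length
  let dp0 := (PySem.List.pyRange 0 (n+1) 1).map
    (fun _ => (PySem.List.pyRange 0 (n+1) 1).map (fun _ => PySem.Set.empty (α := Int)))
  let dp1 := (PySem.List.pyRange 0 n 2).foldl (fun dp lo =>
      pvSet2 dp lo (lo+1) (PySem.Set.add PySem.Set.empty (pvChDigit (PySem.List.pyGetD cs lo ' ')))) dp0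
  let dp2 := (PySem.List.pyRange 2 (n+1) 1).foldl (fun dp len =>
      (PySem.List.pyRange 0 (n - len + 1) 2).foldl (fun dp lo =>
        pvSet2 dp lo (lo + len) (pvCur cs dp lo (lo + len))) dp) dp1
  let cand := pvGet2 dp2 0 n
  (answers.map (fun x => if x = target then (5:Int) else if PySem.Set.contains cand x then 2 else 0)).sum

-- ===== PRECONDITION & SPEC =====
def pvOK : List Char → Bool
  | [] => true
  | [c] => PySem.Chars.isdigit c
  | c :: o :: rest => PySem.Chars.isdigit c && (PySem.Chars.isdigit o || o = '+' || o = '*') && pvOK rest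

-- Pre_ is exactly the set of inputs on which A returns normally: every character is a digit,
-- '+' or '*', and every even-position character is a digit; anywhere else A raises
-- (ValueError from int(), or IndexError on the empty stack).
def Pre_scoreOfStudents (s : String) (answers : List Int) : Prop := pvOK s.toList = true
instance (s : String) (answers : List Int) : Decidable (Pre_scoreOfStudents s answers) := by
  unfold Pre_scoreOfStudents; infer_instance

def pvWitness_scoreOfStudents : String × List Int := ("1+2*3", [7, 9, 0, 1001])

def Spec_scoreOfStudents (s : String) (answers : List Int) (out : Int) : Prop := out = scoreOfStudents_alt s answers
instance (s : String) (answers : List Int) (out : Int) : Decidable (Spec_scoreOfStudents s answers out) := by unfold Spec_scoreOfStudents; infer_instance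

-- ===== CLAIM (what is proved, stated in full; the proofs are below) =====
def Claim_equal_scoreOfStudents : Prop := ∀ (s : String) (answers : List Int), Dom_scoreOfStudents s answers → Pre_scoreOfStudents s answers → Spec_scoreOfStudents s answers (scoreOfStudents s answers)

-- ===== LEMMAS AND PROOFS =====


-- canonical-fuel form of the shared interval recurrence
def pvFN (cs : List Char) (lo hi : Int) : PySem.Set Int := pvFnA cs (hi - lo).toNat lo hi

lemma pvRange_pos_eq_nil (a b s : Int) (h : b ≤ a) (hs : 0 < s) :
    PySem.List.pyRange a b s = [] := by
  rw [PySem.List.pyRange_of_pos _ _ hs, if_neg (by omega)]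
  rfl

lemma pvFnA_empty (cs : List Char) (f : Nat) (lo hi : Int) (h : hi ≤ lo + 1) (h2 : lo + 1 ≠ hi) :
    pvFnA cs f lo hi = PySem.Set.empty := by
  cases f with
  | zero => rfl
  | succ f =>
    simp only [pvFnA, if_neg h2]
    rw [pvRange_pos_eq_nil _ _ _ (by omega) (by omega)]
    simp

lemma pvFnA_stable (cs : List Char) :
    ∀ (f : Nat) (lo hi : Int), (hi - lo).toNat ≤ f → pvFnA cs f lo hi = pvFN cs lo hi := by
  intro f
  induction f using Nat.strong_induction_on with
  | _ f ih =>
    intro lo hi hf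
    by_cases hle : hi ≤ lo + 1
    · by_cases hsing : lo + 1 = hi
      · unfold pvFN
        have ht : (hi - lo).toNat = 1 := by omega
        rw [ht]
        cases f with
        | zero => omega
        | succ f => simp only [pvFnA, if_pos hsing]
      · rw [pvFnA_empty cs f lo hi hle hsing]
        unfold pvFN
        rw [pvFnA_empty cs _ lo hi hle hsing]
    · push Not at hle
      have hsing : lo + 1 ≠ hi := by omega
      obtain ⟨t, htt⟩ : ∃ t, (hi - lo).toNat = t + 1 := ⟨(hi - lo).toNat - 1, by omega⟩
      obtain ⟨g, hg⟩ : ∃ g, f = g + 1 := ⟨f - 1, by omega⟩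
      subst hg
      unfold pvFN
      rw [htt]
      simp only [pvFnA, if_neg hsing]
      apply PySem.List.foldl_congr_mem
      intro acc mid hmid
      rw [PySem.List.mem_pyRange_iff_of_pos (by omega : (0:Int) < 2)] at hmid
      obtain ⟨h1, h2, _⟩ := hmid
      rw [ih g (by omega) lo mid (by omega), ih g (by omega) (mid+1) hi (by omega),
        ih t (by omega) lo mid (by omega), ih t (by omega) (mid+1) hi (by omega)]

lemma pvFN_single (cs : List Char) (lo : Int) :
    pvFN cs lo (lo+1) =
      PySem.Set.add PySem.Set.empty (pvChDigit (PySem.List.pyGetD cs lo ' ')) := by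
  unfold pvFN
  rw [show ((lo+1) - lo).toNat = 1 by omega]
  simp [pvFnA]

lemma pvFN_nil (cs : List Char) (lo hi : Int) (h : hi ≤ lo) :
    pvFN cs lo hi = PySem.Set.empty := by
  unfold pvFN
  rw [show (hi - lo).toNat = 0 by omega]
  rfl

-- a pyGetD from a list whose elements all equal the default is the default
lemma pvGetD_all_eq {α : Type} (xs : List α) (d : α) (h : ∀ x ∈ xs, x = d) (i : Int) :
    PySem.List.pyGetD xs i d = d := by
  simp only [PySem.List.pyGetD]
  cases hx : PySem.List.pyGet? xs i with
  | none => rfl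
  | some x => exact h x (PySem.List.mem_of_pyGet?_eq_some _ hx)

-- dp tables of the right shape: (n+1) × (n+1)
def pvShape (dp : List (List (PySem.Set Int))) (n : Nat) : Prop :=
  dp.length = n + 1 ∧ ∀ row ∈ dp, row.length = n + 1

lemma pvShape_set2 (n : Nat) (dp : List (List (PySem.Set Int))) (h : pvShape dp n)
    (lo hi : Int) (v : PySem.Set Int) (hl : 0 ≤ lo) (hl2 : lo ≤ (n:Int)) :
    pvShape (pvSet2 dp lo hi v) n := by
  obtain ⟨h1, h2⟩ := h
  have hrow : PySem.List.pyGetD dp lo [] ∈ dp := by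
    rw [PySem.List.pyGetD_of_nonneg _ _ hl, List.getD_eq_getElem _ _ (by omega)]
    exact List.getElem_mem _
  refine ⟨by rw [pvSet2, PySem.List.length_pySetD]; exact h1, ?_⟩
  intro row hmem
  rw [pvSet2, PySem.List.pySetD_of_nonneg _ _ hl] at hmem
  rcases List.mem_or_eq_of_mem_set hmem with hm | he
  · exact h2 row hm
  · rw [he, PySem.List.length_pySetD]
    exact h2 _ hrow

lemma pvGet2_set2 (n : Nat) (dp : List (List (PySem.Set Int))) (h : pvShape dp n)
    (lo hi : Int) (v : PySem.Set Int) (lo' hi' : Int)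
    (hl : 0 ≤ lo) (hl2 : lo ≤ (n:Int)) (hh : 0 ≤ hi) (hh2 : hi ≤ (n:Int))
    (hl' : 0 ≤ lo') (hh' : 0 ≤ hi') :
    pvGet2 (pvSet2 dp lo hi v) lo' hi' = if lo' = lo ∧ hi' = hi then v else pvGet2 dp lo' hi' := by
  obtain ⟨hlen, hrows⟩ := h
  unfold pvGet2 pvSet2
  rw [show lo = ((lo.toNat : Nat) : Int) by omega, show hi = ((hi.toNat : Nat) : Int) by omega,
    show lo' = ((lo'.toNat : Nat) : Int) by omega, show hi' = ((hi'.toNat : Nat) : Int) by omega]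
  rw [PySem.List.pyGetD_pySetD_natCast dp lo.toNat lo'.toNat _ _ (by omega)]
  by_cases hcase : lo'.toNat = lo.toNat
  · rw [if_pos hcase]
    have hrow : PySem.List.pyGetD dp ((lo.toNat : Nat) : Int) [] ∈ dp := by
      rw [PySem.List.pyGetD_of_nonneg _ _ (by omega)]
      simp only [Int.toNat_natCast]
      rw [List.getD_eq_getElem _ _ (by omega)]
      exact List.getElem_mem _
    have hrlen := hrows _ hrow
    rw [PySem.List.pyGetD_pySetD_natCast _ hi.toNat hi'.toNat _ _ (by omega)]
    by_cases hc2 : hi'.toNat = hi.toNat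
    · rw [if_pos hc2, if_pos ⟨by omega, by omega⟩]
    · rw [if_neg hc2, if_neg (by omega), hcase]
  · rw [if_neg hcase, if_neg (by omega)]

-- the initial all-empty table of B
lemma pvShape_dp0 (n : Nat) :
    pvShape ((PySem.List.pyRange 0 ((n:Int)+1) 1).map
      (fun _ => (PySem.List.pyRange 0 ((n:Int)+1) 1).map (fun _ => PySem.Set.empty (α := Int)))) n := by
  constructor
  · rw [List.length_map, PySem.List.length_pyRange_one]; omega
  · intro row hrow
    rw [List.mem_map] at hrow
    obtain ⟨_, _, heq⟩ := hrow
    rw [← heq, List.length_map, PySem.List.length_pyRange_one]; omega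

lemma pvGet2_dp0 (n : Nat) (lo hi : Int) :
    pvGet2 ((PySem.List.pyRange 0 ((n:Int)+1) 1).map
      (fun _ => (PySem.List.pyRange 0 ((n:Int)+1) 1).map (fun _ => PySem.Set.empty (α := Int)))) lo hi
    = PySem.Set.empty := by
  unfold pvGet2
  simp only [PySem.List.pyGetD]
  cases hx : PySem.List.pyGet? ((PySem.List.pyRange 0 ((n:Int)+1) 1).map
      (fun _ => (PySem.List.pyRange 0 ((n:Int)+1) 1).map (fun _ => PySem.Set.empty (α := Int)))) lo with
  | none =>
    simp only [Option.getD_none]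
    cases hy : PySem.List.pyGet? ([] : List (PySem.Set Int)) hi with
    | none => rfl
    | some x => exact absurd (PySem.List.mem_of_pyGet?_eq_some _ hy) (by simp)
  | some row =>
    simp only [Option.getD_some]
    have hmem := PySem.List.mem_of_pyGet?_eq_some _ hx
    rw [List.mem_map] at hmem
    obtain ⟨_, _, heq⟩ := hmem
    rw [← heq]
    show PySem.List.pyGetD _ hi PySem.Set.empty = PySem.Set.empty
    refine pvGetD_all_eq _ _ (fun x hxx => ?_) hi
    rw [List.mem_map] at hxx
    obtain ⟨_, _, hx2⟩ := hxx
    exact hx2.symm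

-- B's cur equals the recurrence on [lo, hi), given correct smaller entries
lemma pvCur_eq (cs : List Char) (dp : List (List (PySem.Set Int))) (lo hi : Int)
    (hij : lo + 1 < hi)
    (hdp : ∀ mid : Int, lo + 1 ≤ mid → mid < hi → 2 ∣ mid - (lo + 1) →
      pvGet2 dp lo mid = pvFN cs lo mid ∧ pvGet2 dp (mid+1) hi = pvFN cs (mid+1) hi) :
    pvCur cs dp lo hi = pvFN cs lo hi := by
  obtain ⟨t, htt⟩ : ∃ t, (hi - lo).toNat = t + 1 := ⟨(hi - lo).toNat - 1, by omega⟩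
  unfold pvCur pvFN
  rw [htt]
  simp only [pvFnA, if_neg (by omega : ¬ (lo + 1 = hi))]
  apply PySem.List.foldl_congr_mem
  intro acc mid hmid
  rw [PySem.List.mem_pyRange_iff_of_pos (by omega : (0:Int) < 2)] at hmid
  obtain ⟨h1, h2, h3⟩ := hmid
  obtain ⟨e1, e2⟩ := hdp mid h1 h2 h3
  rw [e1, e2, pvFnA_stable cs t lo mid (by omega), pvFnA_stable cs t (mid+1) hi (by omega)]

def pvInv (cs : List Char) (n : Nat) (L : Int) (dp : List (List (PySem.Set Int))) : Prop :=
  pvShape dp n ∧ ∀ lo hi : Int, 0 ≤ lo → lo ≤ (n:Int) → 0 ≤ hi → hi ≤ (n:Int) →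
    pvGet2 dp lo hi =
      if lo % 2 = 0 ∧ lo + 1 ≤ hi ∧ hi - lo ≤ L then pvFN cs lo hi else PySem.Set.empty

lemma pvRange2_succ (c : Nat) :
    PySem.List.pyRange 0 (2*((c:Int)+1)) 2 = PySem.List.pyRange 0 (2*(c:Int)) 2 ++ [2*(c:Int)] := by
  rw [PySem.List.pyRange_of_pos 0 (2*((c:Int)+1)) (by omega),
    PySem.List.pyRange_of_pos 0 (2*(c:Int)) (by omega)]
  rw [if_pos (by omega), show ((2*((c:Int)+1) - 0 + 2 - 1)/2).toNat = c + 1 by omega]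
  by_cases hc : (0:Int) < 2*(c:Int)
  · rw [if_pos hc, show ((2*(c:Int) - 0 + 2 - 1)/2).toNat = c by omega, List.range_succ,
      List.map_append]
    simp
  · have hc0 : c = 0 := by omega
    subst hc0
    rw [if_neg hc]
    simp

-- the singleton-initialisation fold of B
lemma pvDp1_inv (cs : List Char) :
    pvInv cs cs.length 1
      ((PySem.List.pyRange 0 (cs.length:Int) 2).foldl (fun dp lo =>
        pvSet2 dp lo (lo+1) (PySem.Set.add PySem.Set.empty (pvChDigit (PySem.List.pyGetD cs lo ' '))))
        ((PySem.List.pyRange 0 ((cs.length:Int)+1) 1).map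
          (fun _ => (PySem.List.pyRange 0 ((cs.length:Int)+1) 1).map (fun _ => PySem.Set.empty (α := Int))))) := by
  have hcnt : 2 * ((cs.length + 1) / 2) = cs.length ∨ 2 * ((cs.length + 1) / 2) = cs.length + 1 := by
    omega
  have hconv : PySem.List.pyRange 0 (cs.length:Int) 2
      = PySem.List.pyRange 0 (2*(((cs.length + 1) / 2 : Nat):Int)) 2 := by
    rw [PySem.List.pyRange_of_pos _ _ (by omega : (0:Int) < 2),
      PySem.List.pyRange_of_pos _ _ (by omega : (0:Int) < 2)]
    by_cases h0 : (0:Int) < (cs.length:Int)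
    · rw [if_pos h0, if_pos (by omega),
        show (((cs.length:Int) - 0 + 2 - 1)/2).toNat
          = ((2*(((cs.length + 1) / 2 : Nat):Int) - 0 + 2 - 1)/2).toNat by omega]
    · rw [if_neg h0, if_neg (by omega)]
  rw [hconv]
  have key : ∀ c : Nat, c ≤ (cs.length + 1) / 2 →
      pvShape ((PySem.List.pyRange 0 (2*(c:Int)) 2).foldl (fun dp lo =>
        pvSet2 dp lo (lo+1) (PySem.Set.add PySem.Set.empty (pvChDigit (PySem.List.pyGetD cs lo ' '))))
        ((PySem.List.pyRange 0 ((cs.length:Int)+1) 1).map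
          (fun _ => (PySem.List.pyRange 0 ((cs.length:Int)+1) 1).map (fun _ => PySem.Set.empty (α := Int))))) cs.length
      ∧ ∀ lo hi : Int, 0 ≤ lo → lo ≤ (cs.length:Int) → 0 ≤ hi → hi ≤ (cs.length:Int) →
      pvGet2 ((PySem.List.pyRange 0 (2*(c:Int)) 2).foldl (fun dp lo =>
        pvSet2 dp lo (lo+1) (PySem.Set.add PySem.Set.empty (pvChDigit (PySem.List.pyGetD cs lo ' '))))
        ((PySem.List.pyRange 0 ((cs.length:Int)+1) 1).map
          (fun _ => (PySem.List.pyRange 0 ((cs.length:Int)+1) 1).map (fun _ => PySem.Set.empty (α := Int))))) lo hi =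
      if lo % 2 = 0 ∧ lo + 1 = hi ∧ hi ≤ 2*(c:Int) then pvFN cs lo hi else PySem.Set.empty := by
    intro c
    induction c with
    | zero =>
      intro _
      rw [show (2*((0:Nat):Int)) = 0 by rfl, pvRange_pos_eq_nil 0 0 2 (by omega) (by omega)]
      simp only [List.foldl_nil]
      refine ⟨pvShape_dp0 cs.length, ?_⟩
      intro lo hi h1 h2 h3 h4
      rw [pvGet2_dp0, if_neg (by omega)]
    | succ c ih =>
      intro hc
      obtain ⟨ihs, ihv⟩ := ih (by omega)
      rw [show (2*((c+1:Nat):Int)) = 2*((c:Int)+1) by push_cast; ring, pvRange2_succ c,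
        List.foldl_append]
      simp only [List.foldl_cons, List.foldl_nil]
      refine ⟨pvShape_set2 cs.length _ ihs _ _ _ (by omega) (by omega), ?_⟩
      intro lo hi h1 h2 h3 h4
      rw [pvGet2_set2 cs.length _ ihs (2*(c:Int)) (2*(c:Int)+1) _ lo hi
        (by omega) (by omega) (by omega) (by omega) h1 h3]
      by_cases he : lo = 2*(c:Int) ∧ hi = 2*(c:Int) + 1
      · obtain ⟨e1, e2⟩ := he
        rw [e1, e2, if_pos ⟨rfl, rfl⟩, if_pos (by omega), pvFN_single]
      · rw [if_neg he, ihv lo hi h1 h2 h3 h4]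
        split_ifs <;> first | rfl | omega
  obtain ⟨hs, hv⟩ := key ((cs.length + 1) / 2) (le_refl _)
  refine ⟨hs, ?_⟩
  intro lo hi h1 h2 h3 h4
  rw [hv lo hi h1 h2 h3 h4]
  split_ifs <;> first | rfl | omega

-- one inner pass (fixed length L) of B's fill loop
lemma pvPass_inv (cs : List Char) (n : Nat) (L : Int) (hL : 2 ≤ L)
    (dp : List (List (PySem.Set Int))) (h : pvInv cs n (L-1) dp) :
    pvInv cs n L
      ((PySem.List.pyRange 0 ((n:Int) - L + 1) 2).foldl
        (fun dp lo => pvSet2 dp lo (lo+L) (pvCur cs dp lo (lo+L))) dp) := by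
  obtain ⟨cp, hcp⟩ : ∃ cp : Nat, 2*(cp:Int) = (n:Int) - L + 1 ∨ 2*(cp:Int) = (n:Int) - L + 2 ∨
      ((n:Int) - L + 1 ≤ 0 ∧ cp = 0) := by
    by_cases hb : 0 < (n:Int) - L + 1
    · exact ⟨(((n:Int) - L + 2)/2).toNat, by omega⟩
    · exact ⟨0, by omega⟩
  have hconv : PySem.List.pyRange 0 ((n:Int) - L + 1) 2 = PySem.List.pyRange 0 (2*(cp:Int)) 2 := by
    rw [PySem.List.pyRange_of_pos _ _ (by omega : (0:Int) < 2),
      PySem.List.pyRange_of_pos _ _ (by omega : (0:Int) < 2)]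
    by_cases h0 : (0:Int) < (n:Int) - L + 1
    · rw [if_pos h0, if_pos (by omega),
        show (((n:Int) - L + 1 - 0 + 2 - 1)/2).toNat = ((2*(cp:Int) - 0 + 2 - 1)/2).toNat by omega]
    · rw [if_neg h0, if_neg (by omega)]
  rw [hconv]
  have key : ∀ c : Nat, c ≤ cp →
      pvShape ((PySem.List.pyRange 0 (2*(c:Int)) 2).foldl
        (fun dp lo => pvSet2 dp lo (lo+L) (pvCur cs dp lo (lo+L))) dp) n
      ∧ ∀ lo hi : Int, 0 ≤ lo → lo ≤ (n:Int) → 0 ≤ hi → hi ≤ (n:Int) →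
      pvGet2 ((PySem.List.pyRange 0 (2*(c:Int)) 2).foldl
        (fun dp lo => pvSet2 dp lo (lo+L) (pvCur cs dp lo (lo+L))) dp) lo hi =
      if lo % 2 = 0 ∧ lo + 1 ≤ hi ∧ (hi - lo ≤ L - 1 ∨ (hi - lo = L ∧ lo < 2*(c:Int)))
      then pvFN cs lo hi else PySem.Set.empty := by
    intro c
    induction c with
    | zero =>
      intro _
      rw [show (2*((0:Nat):Int)) = 0 by rfl, pvRange_pos_eq_nil 0 0 2 (by omega) (by omega)]
      simp only [List.foldl_nil]
      refine ⟨h.1, ?_⟩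
      intro lo hi h1 h2 h3 h4
      rw [h.2 lo hi h1 h2 h3 h4]
      split_ifs <;> first | rfl | omega
    | succ c ih =>
      intro hc
      obtain ⟨ihs, ihv⟩ := ih (by omega)
      rw [show (2*((c+1:Nat):Int)) = 2*((c:Int)+1) by push_cast; ring, pvRange2_succ c,
        List.foldl_append]
      simp only [List.foldl_cons, List.foldl_nil]
      refine ⟨pvShape_set2 n _ ihs _ _ _ (by omega) (by omega), ?_⟩
      intro lo hi h1 h2 h3 h4
      rw [pvGet2_set2 n _ ihs (2*(c:Int)) (2*(c:Int)+L) _ lo hi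
        (by omega) (by omega) (by omega) (by omega) h1 h3]
      by_cases he : lo = 2*(c:Int) ∧ hi = 2*(c:Int) + L
      · obtain ⟨e1, e2⟩ := he
        rw [e1, e2, if_pos ⟨rfl, rfl⟩, if_pos (by omega)]
        apply pvCur_eq cs _ _ _ (by omega)
        intro mid hm1 hm2 hm3
        refine ⟨?_, ?_⟩
        · rw [ihv (2*(c:Int)) mid (by omega) (by omega) (by omega) (by omega), if_pos (by omega)]
        · by_cases hb : mid + 1 = 2*(c:Int) + L
          · rw [ihv (mid+1) (2*(c:Int)+L) (by omega) (by omega) (by omega) (by omega),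
              if_neg (by omega), pvFN_nil cs _ _ (by omega)]
          · rw [ihv (mid+1) (2*(c:Int)+L) (by omega) (by omega) (by omega) (by omega),
              if_pos ⟨by omega, by omega, by omega⟩]
      · rw [if_neg he, ihv lo hi h1 h2 h3 h4]
        split_ifs <;> first | rfl | omega
  obtain ⟨hs, hv⟩ := key cp (le_refl _)
  refine ⟨hs, ?_⟩
  intro lo hi h1 h2 h3 h4
  rw [hv lo hi h1 h2 h3 h4]
  split_ifs <;> first | rfl | omega

-- the whole fill loop of B
lemma pvFill_inv (cs : List Char) (n : Nat)
    (dp1 : List (List (PySem.Set Int))) (h1 : pvInv cs n 1 dp1) :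
    ∀ d : Nat, pvInv cs n ((d:Int)+1)
      ((PySem.List.pyRange 2 ((d:Int)+2) 1).foldl (fun dp len =>
        (PySem.List.pyRange 0 ((n:Int) - len + 1) 2).foldl (fun dp lo =>
          pvSet2 dp lo (lo + len) (pvCur cs dp lo (lo + len))) dp) dp1) := by
  intro d
  induction d with
  | zero =>
    rw [show ((0:Nat):Int)+2 = 2 by rfl,
      PySem.List.pyRange_one_eq_nil (a := 2) (b := 2) (by omega)]
    simpa using h1
  | succ d ih =>
    rw [show ((d+1:Nat):Int)+2 = ((d:Int)+2) + 1 by push_cast; ring,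
      PySem.List.pyRange_one_succ_right (by omega : (2:Int) ≤ (d:Int)+2)]
    rw [List.foldl_append]
    simp only [List.foldl_cons, List.foldl_nil]
    have hprev : pvInv cs n (((d:Int)+2)-1)
        ((PySem.List.pyRange 2 ((d:Int)+2) 1).foldl (fun dp len =>
          (PySem.List.pyRange 0 ((n:Int) - len + 1) 2).foldl (fun dp lo =>
            pvSet2 dp lo (lo + len) (pvCur cs dp lo (lo + len))) dp) dp1) := by
      rw [show ((d:Int)+2)-1 = (d:Int)+1 by ring]
      exact ih
    have := pvPass_inv cs n ((d:Int)+2) (by omega) _ hprev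
    rw [show ((d+1:Nat):Int)+1 = (d:Int)+2 by push_cast; ring]
    exact this

lemma pvScore_eq (target : Int) (cand : PySem.Set Int) (answers : List Int) :
    ∀ acc : Int,
      answers.foldl (fun acc x =>
        if x = target then acc + 5
        else if PySem.Set.contains cand x then acc + 2 else acc) acc
      = acc + (answers.map (fun x =>
          if x = target then (5:Int) else if PySem.Set.contains cand x then 2 else 0)).sum := by
  induction answers with
  | nil => intro acc; simp
  | cons a l ih =>
    intro acc
    simp only [List.foldl_cons, List.map_cons, List.sum_cons]
    rw [ih]
    split_ifs <;> ring

-- ===== VERDICT (by name: the statement is the Claim_ definition above) =====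
theorem scoreOfStudents_spec : Claim_equal_scoreOfStudents := by
  unfold Claim_equal_scoreOfStudents
  intro s answers _ hpre
  unfold Spec_scoreOfStudents
  simp only [scoreOfStudents, scoreOfStudents_alt]
  set cs := s.toList with hcs
  have hA : pvFnA cs cs.length 0 (cs.length:Int) = pvFN cs 0 (cs.length:Int) :=
    pvFnA_stable cs cs.length 0 (cs.length:Int) (by omega)
  have hB : pvGet2 ((PySem.List.pyRange 2 ((cs.length:Int)+1) 1).foldl (fun dp len =>
      (PySem.List.pyRange 0 ((cs.length:Int) - len + 1) 2).foldl (fun dp lo =>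
        pvSet2 dp lo (lo + len) (pvCur cs dp lo (lo + len))) dp)
      ((PySem.List.pyRange 0 (cs.length:Int) 2).foldl (fun dp lo =>
        pvSet2 dp lo (lo+1) (PySem.Set.add PySem.Set.empty (pvChDigit (PySem.List.pyGetD cs lo ' '))))
        ((PySem.List.pyRange 0 ((cs.length:Int)+1) 1).map
          (fun _ => (PySem.List.pyRange 0 ((cs.length:Int)+1) 1).map (fun _ => PySem.Set.empty (α := Int))))))
      0 (cs.length:Int)
      = pvFN cs 0 (cs.length:Int) := by
    by_cases hn : cs.length = 0
    · rw [PySem.List.pyRange_one_eq_nil (a := 2) (b := (cs.length:Int)+1) (by omega),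
        pvRange_pos_eq_nil 0 (cs.length:Int) 2 (by omega) (by omega)]
      simp only [List.foldl_nil]
      rw [pvGet2_dp0, pvFN_nil cs _ _ (by omega)]
    · have hfill := pvFill_inv cs cs.length _ (pvDp1_inv cs) (cs.length - 1)
      rw [show ((cs.length - 1 : Nat):Int)+2 = (cs.length:Int)+1 by omega] at hfill
      have hent := hfill.2 0 (cs.length:Int) (by omega) (by omega) (by omega) (by omega)
      rw [if_pos (by omega)] at hent
      exact hent
  rw [pvScore_eq (pvTarget cs) _ answers 0, zero_add, hA, hB]
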